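-- pv_equiv track=rewrite | github.com/peter-kiilu/Guardians-phishguard | backend/feature_extractor.py | _max_char_repeat
-- ===== SOURCE A (Python) =====
-- def _max_char_repeat(s):
--     """Returns the max consecutive repetition count of any character."""
--     if not s:
--         return 0
--     max_repeat = 1
--     current_repeat = 1
--     for i in range(1, len(s)):
--         if s[i] == s[i - 1]:
--             current_repeat += 1
--             max_repeat = max(max_repeat, current_repeat)
--         else:
--             current_repeat = 1
--     return max_repeat
-- ===== SOURCE B (Python) =====
-- def _max_char_repeat(s):
--     """Max consecutive repetition count, by scanning maximal runs with two pointers."""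
--     best = 0
--     i = 0
--     n = len(s)
--     while i < n:
--         j = i + 1
--         while j < n and s[j] == s[i]:
--             j += 1
--         best = max(best, j - i)
--         i = j
--     return best
-- ===== Notes on version B (the rewrite author's own statement) =====
-- stated objective: alternative
-- what changed: Replaces A's single pass with an incremental current/max counter pair by a two-pointer run-segmentation scan: an outer loop jumps from run start to run start, an inner loop finds the end of each maximal run, and the answer is the max of the run lengths (0 for the empty string).
import Mathlib
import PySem

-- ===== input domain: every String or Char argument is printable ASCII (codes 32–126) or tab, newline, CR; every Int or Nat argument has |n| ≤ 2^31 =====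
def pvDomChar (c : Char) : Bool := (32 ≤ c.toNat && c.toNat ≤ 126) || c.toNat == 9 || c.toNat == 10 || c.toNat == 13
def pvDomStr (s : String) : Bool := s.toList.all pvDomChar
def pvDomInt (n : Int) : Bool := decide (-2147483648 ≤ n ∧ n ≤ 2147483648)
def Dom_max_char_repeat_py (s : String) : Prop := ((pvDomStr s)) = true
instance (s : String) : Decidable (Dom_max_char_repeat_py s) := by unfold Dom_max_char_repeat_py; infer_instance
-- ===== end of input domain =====

-- B replaces A's incremental current/max counter pair by a two-pointer scan over maximal runs
-- (alternative decomposition, same O(n) cost); return values proved equal on all strings.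

-- ===== PORT A =====
-- literal transliteration of A: early return 0 on empty, then
-- 'for i in range(1, len(s))' folding the (max_repeat, current_repeat) state.
def max_char_repeat_py (s : String) : Int :=
  let cs := s.toList
  if cs = [] then 0
  else
    ((PySem.List.pyRange 1 (cs.length : Int) 1).foldl
      (fun (st : Int × Int) i =>
        if PySem.List.pyGet? cs i = PySem.List.pyGet? cs (i - 1) then
          (max st.1 (st.2 + 1), st.2 + 1)
        else (st.1, 1)) (1, 1)).1

-- ===== PORT B =====
-- inner 'while j < n and s[j] == s[i]' of Source B: number of further chars equal to the run head
def pvRunLen (c : Char) : List Char → Nat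
  | [] => 0
  | d :: rest => if d = c then pvRunLen c rest + 1 else 0

-- outer 'while i < n' of Source B: jump from run start to run start, keeping the best run length
def pvAltLoop : List Char → Int → Int
  | [], best => best
  | c :: rest, best =>
      let k := pvRunLen c rest
      pvAltLoop (rest.drop k) (max best ((k : Int) + 1))
termination_by cs => cs.length
decreasing_by
  simp only [List.length_drop, List.length_cons]
  omega

def max_char_repeat_py_alt (s : String) : Int := pvAltLoop s.toList 0

-- ===== PRECONDITION & SPEC =====
def Spec_max_char_repeat_py (s : String) (out : Int) : Prop := out = max_char_repeat_py_alt s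
instance (s : String) (out : Int) : Decidable (Spec_max_char_repeat_py s out) := by unfold Spec_max_char_repeat_py; infer_instance

-- ===== CLAIM (what is proved, stated in full; the proofs are below) =====
def Claim_equal_max_char_repeat_py : Prop := ∀ (s : String), Dom_max_char_repeat_py s → Spec_max_char_repeat_py s (max_char_repeat_py s)

-- ===== LEMMAS AND PROOFS =====

theorem pvRunLen_le (c : Char) (cs : List Char) : pvRunLen c cs ≤ cs.length := by
  induction cs with
  | nil => simp [pvRunLen]
  | cons d rest ih => simp only [pvRunLen]; split <;> simp; omega


-- structural form of A's loop body: previous char, (max, cur) state, remaining chars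
def pvAStep : Char → Int × Int → List Char → Int × Int
  | _, st, [] => st
  | c, st, d :: rest =>
      pvAStep d (if d = c then (max st.1 (st.2 + 1), st.2 + 1) else (st.1, 1)) rest

-- max run length of c :: rest when the run ending at c currently has length cur
def pvM : Char → Int → List Char → Int
  | _, cur, [] => cur
  | c, cur, d :: rest => if d = c then pvM d (cur + 1) rest else max cur (pvM d 1 rest)

def pvMM : List Char → Int
  | [] => 0
  | c :: rest => pvM c 1 rest

theorem pvM_ge (rest : List Char) : ∀ (c : Char) (cur : Int), cur ≤ pvM c cur rest := by
  induction rest with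
  | nil => intro c cur; simp [pvM]
  | cons d rest ih =>
      intro c cur
      simp only [pvM]
      split
      · have := ih d (cur + 1); omega
      · have := le_max_left cur (pvM d 1 rest); omega

-- A's index fold over pyRange equals the structural walk pvAStep
theorem pvWalkA (cs : List Char) (rest : List Char) :
    ∀ (pre : List Char) (c : Char) (st : Int × Int),
    cs = pre ++ c :: rest →
    (PySem.List.pyRange ((pre.length : Int) + 1) (cs.length : Int) 1).foldl
      (fun (st : Int × Int) i =>
        if PySem.List.pyGet? cs i = PySem.List.pyGet? cs (i - 1) then
          (max st.1 (st.2 + 1), st.2 + 1)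
        else (st.1, 1)) st = pvAStep c st rest := by
  induction rest with
  | nil =>
      intro pre c st hcs
      have hlen : (cs.length : Int) = (pre.length : Int) + 1 := by
        subst hcs; simp
      rw [hlen, PySem.List.pyRange_one_eq_nil (by omega)]
      simp [pvAStep]
  | cons d rest ih =>
      intro pre c st hcs
      have hlen : (cs.length : Int) = (pre.length : Int) + 2 + rest.length := by
        subst hcs; simp [List.length_append]; ring
      have hlt : (pre.length : Int) + 1 < (cs.length : Int) := by omega
      rw [PySem.List.pyRange_one_cons hlt]
      rw [List.foldl_cons]
      have hget1 : PySem.List.pyGet? cs ((pre.length : Int) + 1) = some d := by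
        have : cs = (pre ++ [c]) ++ d :: rest := by simp [hcs]
        rw [this]
        have := PySem.List.pyGet?_append_length (pre ++ [c]) rest d
        simpa using this
      have hget0 : PySem.List.pyGet? cs ((pre.length : Int) + 1 - 1) = some c := by
        have h1 : (pre.length : Int) + 1 - 1 = (pre.length : Int) := by ring
        rw [h1, hcs]
        exact PySem.List.pyGet?_append_length pre (d :: rest) c
      rw [hget1, hget0]
      have hrec := ih (pre ++ [c]) d
        (if d = c then (max st.1 (st.2 + 1), st.2 + 1) else (st.1, 1))
        (by simp [hcs])
      have hlen2 : ((pre ++ [c]).length : Int) + 1 = (pre.length : Int) + 1 + 1 := by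
        simp [List.length_append]
      rw [hlen2] at hrec
      simp only [Option.some.injEq] at *
      rw [hrec]
      rfl

theorem pvAStep_fst (rest : List Char) :
    ∀ (c : Char) (m cur : Int), 1 ≤ cur → cur ≤ m →
    (pvAStep c (m, cur) rest).1 = max m (pvM c cur rest) := by
  induction rest with
  | nil => intro c m cur h1 h2; simp only [pvAStep, pvM]; omega
  | cons d rest ih =>
      intro c m cur h1 h2
      simp only [pvAStep, pvM]
      by_cases hd : d = c
      · subst hd
        rw [if_pos rfl, if_pos rfl]
        rw [ih d (max m (cur + 1)) (cur + 1) (by omega) (by omega)]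
        have := pvM_ge rest d (cur + 1)
        omega
      · simp only [if_neg hd]
        rw [ih d m 1 (by omega) (by omega)]
        omega

-- pvM split at the end of the current run, in terms of Source B's run length
theorem pvM_run (rest : List Char) :
    ∀ (c : Char) (cur : Int), 0 ≤ cur →
    pvM c cur rest = max (cur + (pvRunLen c rest : Int)) (pvMM (rest.drop (pvRunLen c rest))) := by
  induction rest with
  | nil => intro c cur h; simp [pvM, pvRunLen, pvMM]; omega
  | cons d rest ih =>
      intro c cur h
      simp only [pvM, pvRunLen]
      by_cases hd : d = c
      · subst hd
        rw [ih d (cur + 1) (by omega)]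
        simp only [if_true]
        rw [List.drop_succ_cons]
        push_cast
        omega
      · simp only [if_neg hd]
        simp [pvMM]

theorem pvAltLoop_eq (n : Nat) : ∀ (cs : List Char), cs.length ≤ n → ∀ (best : Int), 0 ≤ best →
    pvAltLoop cs best = max best (pvMM cs) := by
  induction n with
  | zero =>
      intro cs hlen best h
      have hnil : cs = [] := List.eq_nil_of_length_eq_zero (by omega)
      subst hnil; simp [pvAltLoop, pvMM]; omega
  | succ m ih =>
      intro cs hlen best h
      match cs with
      | [] => simp [pvAltLoop, pvMM]; omega
      | c :: rest =>
          simp only [pvAltLoop]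
          rw [ih (rest.drop (pvRunLen c rest))
                (by have := pvRunLen_le c rest; simp only [List.length_drop, List.length_cons] at hlen ⊢; omega)
                _ (by omega)]
          rw [show pvMM (c :: rest) = pvM c 1 rest from rfl]
          rw [pvM_run rest c 1 (by omega)]
          omega

-- ===== VERDICT (by name: the statement is the Claim_ definition above) =====
theorem max_char_repeat_py_spec : Claim_equal_max_char_repeat_py := by
  intro s _
  unfold Spec_max_char_repeat_py max_char_repeat_py max_char_repeat_py_alt
  cases hcs : s.toList with
  | nil => simp [pvAltLoop]
  | cons c rest =>
      simp only [if_neg (by simp : (c :: rest : List Char) ≠ [])]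
      have hw := pvWalkA (c :: rest) rest [] c (1, 1) (by simp)
      simp only [List.length_nil, Nat.cast_zero, zero_add] at hw
      rw [hw]
      rw [pvAStep_fst rest c 1 1 (by omega) (by omega)]
      rw [pvAltLoop_eq (c :: rest).length (c :: rest) le_rfl 0 (by omega)]
      simp only [pvMM]
      have := pvM_ge rest c 1
      omega
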